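-- pv_equiv track=rewrite | github.com/Lucie-Vigreux/py-DCCA | DCCA.py | timeShift
-- ===== SOURCE A (Python) =====
-- import math
--
-- def timeShift(signal, scaleFactor):
--     N = len(signal)
--     y = []
--     for k in range(0, scaleFactor):
--         y_lim = k + math.floor((N-1 - k) / scaleFactor) * scaleFactor
--         y_temp = []
--         for i in range(k, y_lim+1, scaleFactor):
--             y_temp.append(signal[i])
--         y.append(y_temp)
--     return y
-- ===== SOURCE B (Python) =====
-- def timeShift(sig, scaleFactor):
--     if scaleFactor <= 0:
--         return []
--     buckets = [[] for _ in range(scaleFactor)]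
--     for i, x in enumerate(sig):
--         buckets[i % scaleFactor].append(x)
--     return buckets
-- ===== Notes on version B (the rewrite author's own statement) =====
-- stated objective: alternative
-- what changed: Replaces A's per-bucket strided index loops (with a floor-division bound computed per bucket) by a single sequential scatter pass that appends each element to bucket i % scaleFactor, after allocating the empty buckets up front.
import Mathlib
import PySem

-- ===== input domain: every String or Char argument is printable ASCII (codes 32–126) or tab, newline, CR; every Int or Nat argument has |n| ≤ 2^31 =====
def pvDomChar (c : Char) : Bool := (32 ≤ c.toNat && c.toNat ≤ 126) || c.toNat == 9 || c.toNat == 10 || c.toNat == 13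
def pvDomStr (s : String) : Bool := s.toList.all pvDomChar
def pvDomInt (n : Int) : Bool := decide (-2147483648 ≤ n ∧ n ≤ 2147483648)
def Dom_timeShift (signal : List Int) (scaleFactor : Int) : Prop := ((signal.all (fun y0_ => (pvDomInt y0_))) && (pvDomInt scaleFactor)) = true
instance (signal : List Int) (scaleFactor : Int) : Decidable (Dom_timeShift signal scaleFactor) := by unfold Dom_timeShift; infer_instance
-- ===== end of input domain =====

-- B replaces A's per-bucket strided index loops by one sequential scatter pass over the signal (same result, an alternative single-pass decomposition).

-- ===== PORT A =====
-- signal[i] is always in range here (i ≤ y_lim ≤ N-1), so pyGetD's default 0 is never used;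
-- math.floor((N-1-k)/scaleFactor) on ints equals integer floor division exactly on the stated domain.
def timeShift (signal : List Int) (scaleFactor : Int) : List (List Int) :=
  let N : Int := signal.length
  (PySem.List.pyRange 0 scaleFactor 1).foldl (fun y k =>
    let y_lim := k + PySem.Int.floordiv (N - 1 - k) scaleFactor * scaleFactor
    let y_temp := (PySem.List.pyRange k (y_lim + 1) scaleFactor).foldl
        (fun yt i => yt ++ [PySem.List.pyGetD signal i 0]) []
    y ++ [y_temp]) []

-- ===== PORT B =====
def timeShift_alt (signal : List Int) (scaleFactor : Int) : List (List Int) :=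
  if scaleFactor ≤ 0 then []
  else
    (PySem.List.enumerate signal 0).foldl
      (fun b p => b.modify (PySem.Int.mod p.1 scaleFactor).toNat (fun l => l ++ [p.2]))
      (List.replicate scaleFactor.toNat [])

-- ===== PRECONDITION & SPEC =====
def Spec_timeShift (signal : List Int) (scaleFactor : Int) (out : List (List Int)) : Prop := out = timeShift_alt signal scaleFactor
instance (signal : List Int) (scaleFactor : Int) (out : List (List Int)) : Decidable (Spec_timeShift signal scaleFactor out) := by unfold Spec_timeShift; infer_instance

-- ===== CLAIM (what is proved, stated in full; the proofs are below) =====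
def Claim_equal_timeShift : Prop := ∀ (signal : List Int) (scaleFactor : Int), Dom_timeShift signal scaleFactor → Spec_timeShift signal scaleFactor (timeShift signal scaleFactor)

-- ===== LEMMAS AND PROOFS =====


/-- The common normal form: bucket `k` holds the elements whose index is ≡ k (mod n). -/
def pvBucket (sig : List Int) (n k : Nat) : List Int :=
  ((List.range sig.length).filter (fun i => i % n = k)).map (fun i => sig.getD i 0)

theorem pv_A_inner (sig : List Int) (n : Nat) (hn : 0 < n) (k : Nat) (hk : k < n) :
    (PySem.List.pyRange (↑k) ((↑k : Int) + PySem.Int.floordiv ((sig.length : Int) - 1 - ↑k) ↑n * ↑n + 1) ↑n).foldl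
      (fun yt i => yt ++ [PySem.List.pyGetD sig i 0]) []
    = pvBucket sig n k := by
  have hnz : (0:Int) < ↑n := by exact_mod_cast hn
  rw [PySem.List.foldl_append_singleton_eq_map, List.nil_append]
  have hidx : PySem.List.pyRange (↑k) ((↑k : Int) + PySem.Int.floordiv ((sig.length : Int) - 1 - ↑k) ↑n * ↑n + 1) ↑n
      = ((List.range sig.length).filter (fun i => i % n = k)).map Int.ofNat := by
    refine List.Pairwise.eq_of_mem_iff (r := ((· < ·) : Int → Int → Prop)) ?_ ?_ ?_
    · rw [PySem.List.pyRange_of_pos _ _ hnz, List.pairwise_map]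
      exact List.pairwise_lt_range.imp (fun {a b} h => by
        have : (↑n:Int) * ↑a < ↑n * ↑b := by
          exact mul_lt_mul_of_pos_left (by exact_mod_cast h) hnz
        omega)
    · rw [List.pairwise_map]
      exact (List.pairwise_lt_range.filter _).imp (fun {a b} h => Int.ofNat_lt.mpr h)
    · intro x
      rw [PySem.List.mem_pyRange_iff_of_pos hnz]
      simp only [List.mem_map, List.mem_filter, List.mem_range, decide_eq_true_eq,
        Int.ofNat_eq_natCast]
      constructor
      · rintro ⟨hkx, hlt, t, ht⟩
        have ht' : x - ↑k = t * ↑n := by rw [mul_comm] at ht; exact ht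
        have h2 : t * (↑n:Int) ≤ PySem.Int.floordiv ((sig.length : Int) - 1 - ↑k) ↑n * ↑n := by omega
        have h3 : t ≤ PySem.Int.floordiv ((sig.length : Int) - 1 - ↑k) ↑n :=
          (mul_le_mul_iff_of_pos_right hnz).mp h2
        have h4 : t * (↑n:Int) ≤ (sig.length : Int) - 1 - ↑k :=
          (PySem.Int.le_floordiv_iff_mul_le hnz).mp h3
        have hx0 : 0 ≤ x := le_trans (by exact_mod_cast Nat.zero_le k) hkx
        refine ⟨x.toNat, ⟨?_, ?_⟩, Int.toNat_of_nonneg hx0⟩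
        · omega
        · have hmod : x % (↑n:Int) = ↑k := by
            have : x = ↑k + (↑n:Int) * t := by omega
            rw [this, Int.add_mul_emod_self_left]
            exact Int.emod_eq_of_lt (by exact_mod_cast Nat.zero_le k) (by exact_mod_cast hk)
          have : ((x.toNat % n : Nat) : Int) = ((k : Nat) : Int) := by
            push_cast
            rw [Int.toNat_of_nonneg hx0]
            exact hmod
          exact_mod_cast this
      · rintro ⟨i, ⟨hi, him⟩, rfl⟩
        have hki : k ≤ i := him ▸ Nat.mod_le i n
        have hq : (↑n:Int) * ↑(i / n) + ↑k = ↑i := by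
          exact_mod_cast him ▸ Nat.div_add_mod i n
        have hq' : ((i / n : Nat) : Int) * ↑n = (↑i:Int) - ↑k := by
          rw [mul_comm]; omega
        have h3 : ((i / n : Nat) : Int) ≤ PySem.Int.floordiv ((sig.length : Int) - 1 - ↑k) ↑n :=
          (PySem.Int.le_floordiv_iff_mul_le hnz).mpr (by rw [hq']; omega)
        have h2 : ((i / n : Nat) : Int) * ↑n ≤ PySem.Int.floordiv ((sig.length : Int) - 1 - ↑k) ↑n * ↑n :=
          (mul_le_mul_iff_of_pos_right hnz).mpr h3
        exact ⟨by exact_mod_cast hki, by omega, ⟨(i / n : Nat), by omega⟩⟩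
  rw [hidx, List.map_map]
  unfold pvBucket
  apply List.map_congr_left
  intro i _
  simp [Int.ofNat_eq_natCast, PySem.List.pyGetD_natCast]

theorem pv_A_char (sig : List Int) (n : Nat) (hn : 0 < n) :
    timeShift sig ↑n = (List.range n).map (pvBucket sig n) := by
  simp only [timeShift]
  rw [PySem.List.pyRange_zero_nat, PySem.List.foldl_append_singleton_eq_map, List.nil_append,
    List.map_map]
  apply List.map_congr_left
  intro k hk
  exact pv_A_inner sig n hn k (List.mem_range.mp hk)

theorem pv_enumerate_concat {α : Type} (xs : List α) (x : α) (s : Int) :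
    PySem.List.enumerate (xs ++ [x]) s = PySem.List.enumerate xs s ++ [(s + xs.length, x)] := by
  induction xs generalizing s with
  | nil => simp [PySem.List.enumerate_nil, PySem.List.enumerate_cons]
  | cons a as ih =>
    have h : s + ((as.length + 1 : Nat) : Int) = s + 1 + as.length := by push_cast; ring
    simp only [List.cons_append, PySem.List.enumerate_cons, ih, List.length_cons, h]

theorem pv_bucket_concat (xs : List Int) (x : Int) (n : Nat) (j : Nat) :
    pvBucket (xs ++ [x]) n j =
      if xs.length % n = j then pvBucket xs n j ++ [x] else pvBucket xs n j := by
  unfold pvBucket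
  have hfil : ∀ i ∈ (List.range xs.length).filter (fun i => i % n = j),
      (xs ++ [x]).getD i 0 = xs.getD i 0 := by
    intro i hi
    exact List.getD_append _ _ _ _ (List.mem_range.mp (List.mem_filter.mp hi).1)
  simp only [List.length_append, List.length_cons, List.length_nil, List.range_succ,
    List.filter_append, List.map_append]
  rw [List.map_congr_left hfil]
  by_cases hmn : xs.length % n = j
  · simp [hmn]
  · simp [hmn]

theorem pv_B_fold (n : Nat) (sig : List Int) :
    (PySem.List.enumerate sig 0).foldl
      (fun b p => b.modify (PySem.Int.mod p.1 ↑n).toNat (fun l => l ++ [p.2]))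
      (List.replicate n [])
    = (List.range n).map (pvBucket sig n) := by
  induction sig using List.reverseRecOn with
  | nil =>
    simp only [PySem.List.enumerate_nil, List.foldl_nil]
    symm
    rw [List.eq_replicate_iff]
    refine ⟨by simp, ?_⟩
    intro b hb
    obtain ⟨k, -, rfl⟩ := List.mem_map.mp hb
    simp [pvBucket]
  | append_singleton xs x ih =>
    rw [pv_enumerate_concat, List.foldl_append, ih]
    simp only [List.foldl_cons, List.foldl_nil, zero_add, PySem.Int.mod_natCast,
      Int.toNat_natCast]
    apply List.ext_getElem
    · simp
    · intro j h1 h2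
      simp only [List.length_modify, List.length_map, List.length_range] at h1 h2
      rw [List.getElem_modify]
      simp only [List.getElem_map, List.getElem_range, pv_bucket_concat]

theorem pv_B_char (sig : List Int) (n : Nat) (hn : 0 < n) :
    timeShift_alt sig ↑n = (List.range n).map (pvBucket sig n) := by
  have h1 : ¬((n:Int) ≤ 0) := by omega
  simp only [timeShift_alt, if_neg h1, Int.toNat_natCast]
  exact pv_B_fold n sig

-- ===== VERDICT (by name: the statement is the Claim_ definition above) =====
theorem timeShift_spec : Claim_equal_timeShift := by
  intro sig s _hd
  unfold Spec_timeShift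
  by_cases hs : s ≤ 0
  · simp [timeShift, timeShift_alt, hs, PySem.List.pyRange_one_eq_nil hs]
  · have hs' : 0 < s := by omega
    have hsn : ((s.toNat : Int)) = s := Int.toNat_of_nonneg (le_of_lt hs')
    have hn : 0 < s.toNat := by omega
    rw [← hsn, pv_A_char sig s.toNat hn, pv_B_char sig s.toNat hn]
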